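-- pv_equiv track=rewrite | github.com/KumarAmbuj/GEEKSFORGEEKS-BINARYSEARCH | 12.next alphabet.py | findnextalphabet
-- ===== SOURCE A (Python) =====
-- def findnextalphabet(s,ele):
--     low=0
--     high=len(s)-1
--     res=''
--
--     while(low<=high):
--
--         mid=low+(high-low)//2
--
--         if s[mid]>ele:
--             res=s[mid]
--             high=mid-1
--         else:
--             low=mid+1
--     return res
-- ===== SOURCE B (Python) =====
-- def findnextalphabet(s, ele):
--     def go(window, res):
--         if not window:
--             return res
--         m = (len(window) - 1) // 2
--         c = window[m]
--         if c > ele: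
--             return go(window[:m], c)
--         return go(window[m + 1:], res)
--     return go(list(s), '')
-- ===== Notes on version B (the rewrite author's own statement) =====
-- stated objective: alternative
-- what changed: Replaces the iterative low/high index bookkeeping with a recursion over a shrinking list window: B slices the list around its middle element instead of moving indices.
import Mathlib
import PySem

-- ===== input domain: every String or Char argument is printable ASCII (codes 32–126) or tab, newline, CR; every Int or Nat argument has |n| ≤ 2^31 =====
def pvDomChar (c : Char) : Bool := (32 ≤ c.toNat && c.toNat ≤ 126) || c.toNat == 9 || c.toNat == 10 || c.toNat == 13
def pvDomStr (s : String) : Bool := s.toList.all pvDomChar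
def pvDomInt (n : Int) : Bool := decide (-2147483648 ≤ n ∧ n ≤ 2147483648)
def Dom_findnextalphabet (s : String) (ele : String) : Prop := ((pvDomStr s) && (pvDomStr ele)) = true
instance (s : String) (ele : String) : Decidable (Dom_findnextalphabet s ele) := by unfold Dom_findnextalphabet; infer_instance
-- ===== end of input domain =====

-- B replaces A's iterative low/high index bookkeeping by a recursion on a shrinking
-- list window (slice around the middle element); same values, different structure.

-- ===== PORT A =====
-- the while loop: state (low, high, res); the pyGet? 'none' branch only totalizes
-- the definition (the loop keeps mid within bounds) and never fires from the entry call.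
def findnextalphabetLoop (cs : List Char) (ele : String) (low high : Int) (res : String) : String :=
  if _h : low ≤ high then
    let mid := low + PySem.Int.floordiv (high - low) 2
    match PySem.List.pyGet? cs mid with
    | none => res
    | some c =>
      if ele < String.ofList [c] then
        findnextalphabetLoop cs ele low (mid - 1) (String.ofList [c])
      else
        findnextalphabetLoop cs ele (mid + 1) high res
  else res
termination_by (high + 1 - low).toNat
decreasing_by
  · have h2 := PySem.Int.floordiv_two_mid_bounds (lo := 0) (hi := high - low) (by omega)
    rw [zero_add] at h2; omega
  · have h2 := PySem.Int.floordiv_two_mid_bounds (lo := 0) (hi := high - low) (by omega)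
    rw [zero_add] at h2; omega

def findnextalphabet (s : String) (ele : String) : String :=
  findnextalphabetLoop s.toList ele 0 ((s.toList.length : Int) - 1) ""

-- ===== PORT B =====
-- go(window, res): slice the window around its middle element
def findnextalphabetGo (ele : String) : List Char → String → String
  | [], res => res
  | x :: xs, res =>
    let m := ((x :: xs).length - 1) / 2
    let c := (x :: xs).getD m x   -- m < length always; the default x only totalizes the lookup
    if ele < String.ofList [c] then
      findnextalphabetGo ele ((x :: xs).take m) (String.ofList [c])
    else
      findnextalphabetGo ele ((x :: xs).drop (m + 1)) res
termination_by w => w.length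
decreasing_by
  · simp only [List.length_take, List.length_cons]; omega
  · simp only [List.length_drop, List.length_cons]; omega

def findnextalphabet_alt (s : String) (ele : String) : String :=
  findnextalphabetGo ele s.toList ""

-- ===== PRECONDITION & SPEC =====
def Spec_findnextalphabet (s : String) (ele : String) (out : String) : Prop := out = findnextalphabet_alt s ele
instance (s : String) (ele : String) (out : String) : Decidable (Spec_findnextalphabet s ele out) := by unfold Spec_findnextalphabet; infer_instance

-- ===== CLAIM (what is proved, stated in full; the proofs are below) =====
def Claim_equal_findnextalphabet : Prop := ∀ (s : String) (ele : String), Dom_findnextalphabet s ele → Spec_findnextalphabet s ele (findnextalphabet s ele)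

-- ===== LEMMAS AND PROOFS =====

-- The loop on the index window [low, high] computes go on the slice cs[low : high+1].
theorem loop_eq_go (cs : List Char) (ele : String) :
    ∀ (n : ℕ) (low high : Int) (res : String), (high + 1 - low).toNat = n →
      0 ≤ low → high < (cs.length : Int) →
      findnextalphabetLoop cs ele low high res =
        findnextalphabetGo ele ((cs.drop low.toNat).take n) res := by
  intro n
  induction n using Nat.strong_induction_on with
  | _ n ih =>
    intro low high res hn hlow hhigh
    by_cases h : low ≤ high
    · -- window nonempty
      have hn1 : 1 ≤ n := by omega
      have hd : PySem.Int.floordiv (high - low) 2 = ((high - low).toNat / 2 : ℕ) := by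
        have he : (high - low) = ((high - low).toNat : Int) := by omega
        rw [he]
        exact_mod_cast PySem.Int.floordiv_natCast (high - low).toNat 2
      set a := low.toNat with ha
      set m : ℕ := (n - 1) / 2 with hm
      have hmn : m < n := by omega
      have hlen : a + n ≤ cs.length := by omega
      have hwin : ((cs.drop a).take n).length = n := by
        simp [List.length_take, List.length_drop]; omega
      have hne : (cs.drop a).take n ≠ [] := by
        intro hw; rw [hw] at hwin; simp at hwin; omega
      obtain ⟨x, xs, hxxs⟩ := List.exists_cons_of_ne_nil hne
      have hmid : low + PySem.Int.floordiv (high - low) 2 = ((a + m : ℕ) : Int) := by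
        rw [hd]; omega
      have hidx : a + m < cs.length := by omega
      have hget : PySem.List.pyGet? cs (low + PySem.Int.floordiv (high - low) 2) =
          some (cs[a + m]'hidx) := by
        rw [hmid, PySem.List.pyGet?_natCast, List.getElem?_eq_getElem hidx]
      have hmwin : m < ((cs.drop a).take n).length := by omega
      have hwinget : ((cs.drop a).take n)[m]'hmwin = cs[a + m]'hidx := by
        simp only [List.getElem_take, List.getElem_drop]
      have hlenxs : (x :: xs).length = n := by rw [← hxxs, hwin]
      have hc : (x :: xs).getD m x = cs[a + m]'hidx := by
        rw [← hxxs, List.getD_eq_getElem _ _ hmwin, hwinget]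
      rw [findnextalphabetLoop, dif_pos h]
      simp only [hget]
      rw [hxxs, findnextalphabetGo]
      simp only [hlenxs, ← hm, hc]
      by_cases hcmp : ele < String.ofList [cs[a + m]'hidx]
      · rw [if_pos hcmp, if_pos hcmp, hmid]
        have hrec := ih m hmn low (((a + m : ℕ) : Int) - 1) (String.ofList [cs[a + m]'hidx])
          (by omega) hlow (by omega)
        rw [hrec]
        congr 1
        rw [← hxxs, List.take_take]
        congr 1; omega
      · rw [if_neg hcmp, if_neg hcmp, hmid]
        have hrec := ih (n - m - 1) (by omega) (((a + m : ℕ) : Int) + 1) high res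
          (by omega) (by omega) hhigh
        rw [hrec, show (((a + m : ℕ) : Int) + 1).toNat = a + m + 1 from by omega]
        rw [← hxxs, List.drop_take, List.drop_drop]
        congr 2
    · -- window empty
      have hn0 : n = 0 := by omega
      rw [findnextalphabetLoop, dif_neg h, hn0]
      simp [findnextalphabetGo]

-- ===== VERDICT (by name: the statement is the Claim_ definition above) =====
theorem findnextalphabet_spec : Claim_equal_findnextalphabet := by
  intro s ele _
  unfold Spec_findnextalphabet findnextalphabet findnextalphabet_alt
  rw [loop_eq_go s.toList ele s.toList.length 0 ((s.toList.length : Int) - 1) ""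
      (by omega) (by omega) (by omega)]
  rw [show (0 : Int).toNat = 0 from rfl, List.drop_zero, List.take_length]
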